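-- pv_equiv track=rewrite | github.com/greganderson/terminal-ctf | challenge-5/generate_flag.py | tb10
-- ===== SOURCE A (Python) =====
-- def tb10(n, alph):
--     prd = 0
--     for c in n:
--         ps = alph.find(c)
--         if ps >= 0:
--             prd *= len(alph)
--             prd += ps
--     return prd
-- ===== SOURCE B (Python) =====
-- def tb10(n, alph):
--     d = [alph.find(c) for c in n if alph.find(c) >= 0]
--     base = len(alph)
--     total = 0
--     w = 1
--     for v in reversed(d):
--         total += v * w
--         w *= base
--     return total
-- ===== Notes on version B (the rewrite author's own statement) =====
-- stated objective: alternative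
-- what changed: Replaces A's in-loop conditional Horner multiply-accumulate with a two-phase scheme: first build the filtered list of digit values, then sum them back-to-front while maintaining the positional weight base**k.
import Mathlib
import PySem

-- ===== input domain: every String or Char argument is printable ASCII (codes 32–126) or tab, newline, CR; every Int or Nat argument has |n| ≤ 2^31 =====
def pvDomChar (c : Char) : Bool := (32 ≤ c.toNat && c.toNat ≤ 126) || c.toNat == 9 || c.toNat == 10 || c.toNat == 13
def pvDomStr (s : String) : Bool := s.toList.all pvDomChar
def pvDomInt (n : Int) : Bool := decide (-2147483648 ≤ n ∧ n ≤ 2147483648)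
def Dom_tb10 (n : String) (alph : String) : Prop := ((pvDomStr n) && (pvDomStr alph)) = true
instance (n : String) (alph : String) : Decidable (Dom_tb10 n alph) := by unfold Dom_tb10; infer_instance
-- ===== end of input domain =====

-- B replaces A's in-loop conditional Horner multiply-accumulate with a two-phase scheme:
-- filter the digit values first, then sum them back-to-front maintaining the positional
-- weight (objective: alternative decomposition, same cost).

-- ===== PORT A =====
def tb10 (n : String) (alph : String) : Int :=
  n.toList.foldl
    (fun prd c =>
      let ps := PySem.Chars.find alph.toList [c]
      if 0 ≤ ps then prd * (alph.toList.length : Int) + ps else prd)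
    0

-- ===== PORT B =====
def tb10_alt (n : String) (alph : String) : Int :=
  let d := (n.toList.map (fun c => PySem.Chars.find alph.toList [c])).filter
             (fun x => decide (0 ≤ x))
  let base := (alph.toList.length : Int)
  (d.reverse.foldl (fun (st : Int × Int) v => (st.1 + v * st.2, st.2 * base)) (0, 1)).1

-- ===== PRECONDITION & SPEC =====
def Spec_tb10 (n : String) (alph : String) (out : Int) : Prop := out = tb10_alt n alph
instance (n : String) (alph : String) (out : Int) : Decidable (Spec_tb10 n alph out) := by unfold Spec_tb10; infer_instance

-- ===== CLAIM (what is proved, stated in full; the proofs are below) =====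
def Claim_equal_tb10 : Prop := ∀ (n : String) (alph : String), Dom_tb10 n alph → Spec_tb10 n alph (tb10 n alph)

-- ===== LEMMAS AND PROOFS =====

/-- Little-endian value of a digit list: `littleVal b e = Σ e[i]·b^i`. -/
def littleVal (b : Int) : List Int → Int
  | [] => 0
  | v :: e => v + b * littleVal b e

theorem littleVal_append_singleton (b x : Int) (e : List Int) :
    littleVal b (e ++ [x]) = littleVal b e + x * b ^ e.length := by
  induction e with
  | nil => simp [littleVal]
  | cons v e ih => simp only [List.cons_append, littleVal, ih, List.length_cons]; ring

/-- A's conditioned Horner loop equals the unconditioned Horner loop over the filtered digit list. -/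
theorem tb10_filter_step (cs : List Char) (F : Char → Int) (b a : Int) :
    cs.foldl (fun prd c => let ps := F c; if 0 ≤ ps then prd * b + ps else prd) a
      = ((cs.map F).filter (fun x => decide (0 ≤ x))).foldl (fun p x => p * b + x) a := by
  induction cs generalizing a with
  | nil => rfl
  | cons c cs ih =>
      simp only [List.foldl_cons, List.map_cons, List.filter_cons]
      by_cases h : 0 ≤ F c
      · simp [h, ih]
      · simp [h, ih]

/-- Horner evaluation is the little-endian value of the reversed digit list. -/
theorem horner_eq_littleVal_reverse (d : List Int) (b a : Int) :
    d.foldl (fun p x => p * b + x) a = a * b ^ d.length + littleVal b d.reverse := by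
  induction d generalizing a with
  | nil => simp [littleVal]
  | cons x d ih =>
      simp only [List.foldl_cons, List.reverse_cons, List.length_cons,
        littleVal_append_singleton, List.length_reverse]
      rw [ih (a * b + x)]
      ring

/-- B's back-to-front weighted loop computes the little-endian value (with weight tracking). -/
theorem back_loop_eq (b : Int) (e : List Int) (t w : Int) :
    e.foldl (fun (st : Int × Int) v => (st.1 + v * st.2, st.2 * b)) (t, w)
      = (t + w * littleVal b e, w * b ^ e.length) := by
  induction e generalizing t w with
  | nil => simp [littleVal]
  | cons v e ih =>
      simp only [List.foldl_cons, ih, littleVal, List.length_cons, Prod.mk.injEq]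
      constructor <;> ring

-- ===== VERDICT (by name: the statement is the Claim_ definition above) =====
theorem tb10_spec : Claim_equal_tb10 := by
  intro n alph _
  unfold Spec_tb10 tb10 tb10_alt
  dsimp only
  rw [tb10_filter_step, horner_eq_littleVal_reverse, back_loop_eq]
  simp
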